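-- pv_equiv track=rewrite | github.com/Durgaprasad-kakarla/Geeks-for-Geeks | Difficulty: Easy/Segregate 0s and 1s/segregate-0s-and-1s.py | segregate0and1
-- ===== SOURCE A (Python) =====
-- def segregate0and1(arr):
--     # code here
--     n=len(arr)
--     l,r=0,0
--     while r<n:
--         if arr[l]==0:
--             l+=1
--             r+=1
--         else:
--             if arr[r]==1:
--                 r+=1
--             else:
--                 arr[l],arr[r]=arr[r],arr[l]
--                 l+=1
--                 r+=1
--     return arr
-- ===== SOURCE B (Python) =====
-- def segregate0and1(arr):
--     nonones = [x for x in arr if x != 1]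
--     ones = [x for x in arr if x == 1]
--     arr[:] = nonones + ones
--     return arr
-- ===== Notes on version B (the rewrite author's own statement) =====
-- stated objective: simpler
-- what changed: Replaces the in-place two-pointer swap loop with two filter passes (non-ones then ones) concatenated and assigned back; both mutate arr in place and return it.
import Mathlib
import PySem

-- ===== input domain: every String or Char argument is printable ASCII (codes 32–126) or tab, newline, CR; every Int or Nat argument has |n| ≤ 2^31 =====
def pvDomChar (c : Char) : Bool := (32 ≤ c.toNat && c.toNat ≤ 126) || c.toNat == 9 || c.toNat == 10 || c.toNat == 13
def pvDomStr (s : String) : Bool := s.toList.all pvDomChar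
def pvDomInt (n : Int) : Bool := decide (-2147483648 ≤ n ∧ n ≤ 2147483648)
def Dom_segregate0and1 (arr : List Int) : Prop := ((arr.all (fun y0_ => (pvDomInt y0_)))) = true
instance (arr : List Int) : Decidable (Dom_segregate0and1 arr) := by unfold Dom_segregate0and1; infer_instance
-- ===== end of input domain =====

-- B replaces A's in-place two-pointer swap loop with two filter passes concatenated; both
-- Pythons mutate the argument list in place and return it, and the equivalence proved here
-- is about the return value.

-- ===== PORT A =====
-- the 'while r < n' loop of A; fuel is a termination guard only (every iteration increments r,
-- so fuel = n + 1 is never exhausted), and the 'none' arms are the unreachable IndexError (l ≤ r < n).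
def segLoop (fuel : Nat) (arr : List Int) (l r n : Int) : List Int :=
  match fuel with
  | 0 => arr
  | fuel + 1 =>
    if r < n then
      match PySem.List.pyGet? arr l with
      | none => arr
      | some al =>
        if al = 0 then segLoop fuel arr (l + 1) (r + 1) n
        else
          match PySem.List.pyGet? arr r with
          | none => arr
          | some ar =>
            if ar = 1 then segLoop fuel arr l (r + 1) n
            else segLoop fuel (PySem.List.pySetD (PySem.List.pySetD arr l ar) r al) (l + 1) (r + 1) n
    else arr

def segregate0and1 (arr : List Int) : List Int :=
  segLoop (arr.length + 1) arr 0 0 (arr.length : Int)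

-- ===== PORT B =====
def segregate0and1_alt (arr : List Int) : List Int :=
  arr.filter (fun x => x != 1) ++ arr.filter (fun x => x == 1)

-- ===== PRECONDITION & SPEC =====
def Spec_segregate0and1 (arr : List Int) (out : List Int) : Prop := out = segregate0and1_alt arr
instance (arr : List Int) (out : List Int) : Decidable (Spec_segregate0and1 arr out) := by unfold Spec_segregate0and1; infer_instance

-- ===== CLAIM (what is proved, stated in full; the proofs are below) =====
def Claim_equal_segregate0and1 : Prop := ∀ (arr : List Int), Dom_segregate0and1 arr → Spec_segregate0and1 arr (segregate0and1 arr)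

-- ===== LEMMAS AND PROOFS =====

lemma segLoop_stop (fuel : Nat) (arr : List Int) (l r n : Int) (h : ¬ r < n) :
    segLoop fuel arr l r n = arr := by
  cases fuel <;> simp [segLoop, h]

lemma segLoop_step_zero (fuel : Nat) (arr : List Int) (l r n : Int) (h : r < n)
    (al : Int) (hal : PySem.List.pyGet? arr l = some al) (h0 : al = 0) :
    segLoop (fuel + 1) arr l r n = segLoop fuel arr (l + 1) (r + 1) n := by
  simp [segLoop, h, hal, h0]

lemma segLoop_step_one (fuel : Nat) (arr : List Int) (l r n : Int) (h : r < n)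
    (al ar : Int) (hal : PySem.List.pyGet? arr l = some al) (h0 : al ≠ 0)
    (har : PySem.List.pyGet? arr r = some ar) (h1 : ar = 1) :
    segLoop (fuel + 1) arr l r n = segLoop fuel arr l (r + 1) n := by
  simp [segLoop, h, hal, h0, har, h1]

lemma segLoop_step_swap (fuel : Nat) (arr : List Int) (l r n : Int) (h : r < n)
    (al ar : Int) (hal : PySem.List.pyGet? arr l = some al) (h0 : al ≠ 0)
    (har : PySem.List.pyGet? arr r = some ar) (h1 : ar ≠ 1) :
    segLoop (fuel + 1) arr l r n
      = segLoop fuel (PySem.List.pySetD (PySem.List.pySetD arr l ar) r al) (l + 1) (r + 1) n := by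
  simp [segLoop, h, hal, h0, har, h1]

lemma set_append_length {α : Type} (pre : List α) (a b : α) (tl : List α) :
    (pre ++ a :: tl).set pre.length b = pre ++ b :: tl := by
  induction pre with
  | nil => simp
  | cons x xs ih => simp [ih]

-- Loop invariant: arr = (non-ones seen so far) ++ (ones seen so far) ++ (unprocessed rest),
-- with l and r at the two boundaries.
lemma segLoop_inv (rest : List Int) : ∀ (pre : List Int) (k fuel : Nat) (l r n : Int),
    rest.length ≤ fuel → l = (pre.length : Int) → r = l + (k : Int) → n = r + (rest.length : Int) →
    segLoop fuel (pre ++ List.replicate k 1 ++ rest) l r n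
      = (pre ++ rest.filter (fun x => x != 1)) ++ List.replicate (k + rest.count 1) 1 := by
  induction rest with
  | nil =>
    intro pre k fuel l r n _ _ _ hn
    rw [segLoop_stop fuel _ l r n (by first | omega | (simp only [List.length_append, List.length_cons, List.length_nil, List.length_replicate] at *; omega))]
    simp
  | cons a rest ih =>
    intro pre k fuel l r n hf hl hr hn
    match fuel with
    | 0 => simp at hf
    | fuel + 1 =>
      have hf' : rest.length ≤ fuel := by simp only [List.length_cons] at hf; omega
      have hrn : r < n := by first | omega | (simp only [List.length_append, List.length_cons, List.length_nil, List.length_replicate] at *; omega)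
      match k with
      | 0 =>
        have harr : pre ++ List.replicate 0 1 ++ a :: rest = pre ++ a :: rest := by simp
        have hget : PySem.List.pyGet? (pre ++ List.replicate 0 1 ++ a :: rest) l = some a := by
          rw [harr, hl]; exact PySem.List.pyGet?_append_length pre rest a
        have hrl : r = l := by push_cast at hr; omega
        have hgetr : PySem.List.pyGet? (pre ++ List.replicate 0 1 ++ a :: rest) r = some a := by
          rw [hrl]; exact hget
        by_cases ha0 : a = 0
        · rw [segLoop_step_zero fuel _ l r n hrn a hget ha0]
          rw [show pre ++ List.replicate 0 1 ++ a :: rest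
              = (pre ++ [a]) ++ List.replicate 0 1 ++ rest by simp]
          rw [ih (pre ++ [a]) 0 fuel (l + 1) (r + 1) n hf'
            (by first | omega | (simp only [List.length_append, List.length_cons, List.length_nil, List.length_replicate] at *; omega)) (by first | omega | (simp only [List.length_append, List.length_cons, List.length_nil, List.length_replicate] at *; omega)) (by first | omega | (simp only [List.length_append, List.length_cons, List.length_nil, List.length_replicate] at *; omega))]
          subst ha0
          simp [List.filter_cons, List.count_cons]
        · by_cases ha1 : a = 1
          · rw [segLoop_step_one fuel _ l r n hrn a a hget ha0 hgetr ha1]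
            rw [show pre ++ List.replicate 0 1 ++ a :: rest
                = pre ++ List.replicate 1 1 ++ rest by simp [ha1]]
            rw [ih pre 1 fuel l (r + 1) n hf' hl (by first | omega | (simp only [List.length_append, List.length_cons, List.length_nil, List.length_replicate] at *; omega)) (by first | omega | (simp only [List.length_append, List.length_cons, List.length_nil, List.length_replicate] at *; omega))]
            subst ha1
            have hc : (0 : Nat) + List.count 1 ((1 : Int) :: rest) = 1 + List.count 1 rest := by
              simp [List.count_cons] <;> omega
            rw [hc]
            simp
          · rw [segLoop_step_swap fuel _ l r n hrn a a hget ha0 hgetr ha1]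
            have hset : PySem.List.pySetD (PySem.List.pySetD
                (pre ++ List.replicate 0 1 ++ a :: rest) l a) r a
                = (pre ++ [a]) ++ List.replicate 0 1 ++ rest := by
              rw [harr, hl, PySem.List.pySetD_natCast, set_append_length, hrl, hl,
                PySem.List.pySetD_natCast, set_append_length]
              simp
            rw [hset]
            rw [ih (pre ++ [a]) 0 fuel (l + 1) (r + 1) n hf'
              (by first | omega | (simp only [List.length_append, List.length_cons, List.length_nil, List.length_replicate] at *; omega)) (by first | omega | (simp only [List.length_append, List.length_cons, List.length_nil, List.length_replicate] at *; omega)) (by first | omega | (simp only [List.length_append, List.length_cons, List.length_nil, List.length_replicate] at *; omega))]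
            simp [List.filter_cons, List.count_cons, ha1]
      | k' + 1 =>
        have harr : pre ++ List.replicate (k' + 1) 1 ++ a :: rest
            = pre ++ (1 : Int) :: (List.replicate k' 1 ++ a :: rest) := by
          simp [List.replicate_succ]
        have hget : PySem.List.pyGet? (pre ++ List.replicate (k' + 1) 1 ++ a :: rest) l
            = some 1 := by
          rw [harr, hl]; exact PySem.List.pyGet?_append_length pre _ 1
        have harr2 : pre ++ List.replicate (k' + 1) 1 ++ a :: rest
            = (pre ++ List.replicate (k' + 1) 1) ++ a :: rest := by simp
        have hrr : r = ((pre ++ List.replicate (k' + 1) 1).length : Int) := by first | omega | (simp only [List.length_append, List.length_cons, List.length_nil, List.length_replicate] at *; omega)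
        have hgetr : PySem.List.pyGet? (pre ++ List.replicate (k' + 1) 1 ++ a :: rest) r
            = some a := by
          rw [harr2, hrr]; exact PySem.List.pyGet?_append_length _ rest a
        have h10 : (1 : Int) ≠ 0 := by decide
        by_cases ha1 : a = 1
        · rw [segLoop_step_one fuel _ l r n hrn 1 a hget h10 hgetr ha1]
          rw [show pre ++ List.replicate (k' + 1) 1 ++ a :: rest
              = pre ++ List.replicate (k' + 2) 1 ++ rest by
            rw [ha1, show List.replicate (k' + 2) (1 : Int) = List.replicate (k' + 1) 1 ++ [1] from
              List.replicate_succ']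
            simp]
          rw [ih pre (k' + 2) fuel l (r + 1) n hf' hl (by first | omega | (simp only [List.length_append, List.length_cons, List.length_nil, List.length_replicate] at *; omega)) (by first | omega | (simp only [List.length_append, List.length_cons, List.length_nil, List.length_replicate] at *; omega))]
          subst ha1
          have hc : k' + 1 + List.count 1 ((1 : Int) :: rest) = k' + 2 + List.count 1 rest := by
            simp [List.count_cons] <;> omega
          rw [hc]
          simp
        · rw [segLoop_step_swap fuel _ l r n hrn 1 a hget h10 hgetr ha1]
          have hset : PySem.List.pySetD (PySem.List.pySetD
              (pre ++ List.replicate (k' + 1) 1 ++ a :: rest) l a) r 1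
              = (pre ++ [a]) ++ List.replicate (k' + 1) 1 ++ rest := by
            rw [harr, hl, PySem.List.pySetD_natCast, set_append_length]
            rw [show pre ++ a :: (List.replicate k' 1 ++ a :: rest)
                = (pre ++ a :: List.replicate k' 1) ++ a :: rest by simp]
            have hrr2 : r = ((pre ++ a :: List.replicate k' 1).length : Int) := by first | omega | (simp only [List.length_append, List.length_cons, List.length_nil, List.length_replicate] at *; omega)
            rw [hrr2, PySem.List.pySetD_natCast, set_append_length]
            rw [show List.replicate (k' + 1) (1 : Int) = List.replicate k' 1 ++ [1] from
              List.replicate_succ']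
            simp
          rw [hset]
          rw [ih (pre ++ [a]) (k' + 1) fuel (l + 1) (r + 1) n hf'
            (by first | omega | (simp only [List.length_append, List.length_cons, List.length_nil, List.length_replicate] at *; omega)) (by first | omega | (simp only [List.length_append, List.length_cons, List.length_nil, List.length_replicate] at *; omega)) (by first | omega | (simp only [List.length_append, List.length_cons, List.length_nil, List.length_replicate] at *; omega))]
          simp [List.filter_cons, List.count_cons, ha1]

lemma filter_eq_one (arr : List Int) :
    arr.filter (fun x => x == 1) = List.replicate (arr.count 1) 1 := by
  induction arr with
  | nil => simp
  | cons a tl ih =>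
    by_cases h1 : a = 1
    · subst h1; simp [List.filter_cons, List.count_cons, ih, List.replicate_succ]
    · simp [List.filter_cons, h1, List.count_cons, ih]

-- ===== VERDICT (by name: the statement is the Claim_ definition above) =====
theorem segregate0and1_spec : Claim_equal_segregate0and1 := by
  intro arr _
  unfold Spec_segregate0and1 segregate0and1 segregate0and1_alt
  have h := segLoop_inv arr [] 0 (arr.length + 1) 0 0 (arr.length : Int) (by omega)
    (by simp) (by simp) (by simp)
  simp only [List.nil_append, List.replicate_zero, Nat.zero_add] at h
  rw [h, filter_eq_one]
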